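-- pv_equiv track=rewrite | github.com/yididiabera/A2SV-Inperson | 2551-apply-operations-to-an-array/2551-apply-operations-to-an-array.py | applyOperations
-- ===== SOURCE A (Python) =====
-- def applyOperations(nums):
--     """
--     :type nums: List[int]
--     :rtype: List[int]
--     """
--     #iterate over the entire array
--     #check if the current element and the previous one are equal or not
--     #if they are equal mulitply the prev element by 2 and make the current zero
--     n = len(nums)
--     l = 0
--     for r in range(n):
--         if r < n - 1 and nums[r] == nums[r + 1]:
--             nums[r] *= 2
--             nums[r + 1] = 0
--         if nums[r]:
--             nums[l] = nums[r]
--             if l != r: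
--                 nums[r] = 0
--             l += 1
--     return nums
-- ===== SOURCE B (Python) =====
-- def applyOperations(nums):
--     # Two clear passes instead of A's fused loop: merge equal neighbours, then compact nonzeros left (in-place via nums[:]).
--     for i in range(len(nums) - 1):
--         if nums[i] == nums[i + 1]:
--             nums[i] *= 2
--             nums[i + 1] = 0
--     nums[:] = [x for x in nums if x] + [0] * nums.count(0)
--     return nums
-- ===== Notes on version B (the rewrite author's own statement) =====
-- stated objective: simpler
-- what changed: B splits A's single fused loop (which merges neighbours and compacts nonzeros with a left write-pointer in one pass) into two plain passes: a merge pass over adjacent pairs, then a one-line compaction building the nonzeros followed by the counted zeros.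
import Mathlib
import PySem

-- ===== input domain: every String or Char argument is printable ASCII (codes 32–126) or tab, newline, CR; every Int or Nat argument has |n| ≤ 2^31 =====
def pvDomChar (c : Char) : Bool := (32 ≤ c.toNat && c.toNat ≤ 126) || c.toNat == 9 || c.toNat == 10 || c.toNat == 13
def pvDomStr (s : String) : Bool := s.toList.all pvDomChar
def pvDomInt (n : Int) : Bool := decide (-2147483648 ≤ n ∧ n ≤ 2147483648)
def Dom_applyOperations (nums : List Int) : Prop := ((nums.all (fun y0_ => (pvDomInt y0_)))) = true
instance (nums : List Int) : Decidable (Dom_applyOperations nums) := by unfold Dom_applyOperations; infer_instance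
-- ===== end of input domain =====

-- B replaces A's fused merge-and-compact loop by two separate passes (merge equal neighbours, then compact nonzeros left);
-- equivalence is about the RETURN value only (both Pythons also mutate `nums` in place to that same final list).

-- ===== PORT A =====
-- one iteration of A's fused loop: state is (array, left write pointer l), r is the loop index
def pvStepA (st : List Int × Nat) (r : Nat) : List Int × Nat :=
  let a := st.1
  let l := st.2
  let n := a.length
  let a1 := if r < n - 1 ∧ a.getD r 0 = a.getD (r+1) 0
            then (a.set r (a.getD r 0 * 2)).set (r+1) 0 else a
  if a1.getD r 0 ≠ 0 then
    let a2 := a1.set l (a1.getD r 0)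
    let a3 := if l ≠ r then a2.set r 0 else a2
    (a3, l + 1)
  else (a1, l)

def applyOperations (nums : List Int) : List Int :=
  ((List.range nums.length).foldl pvStepA (nums, 0)).1

-- ===== PORT B =====
-- first pass of B: merge equal neighbours at index i
def pvMergeStep (a : List Int) (i : Nat) : List Int :=
  if a.getD i 0 = a.getD (i+1) 0 then (a.set i (a.getD i 0 * 2)).set (i+1) 0 else a

def applyOperations_alt (nums : List Int) : List Int :=
  let a := (List.range (nums.length - 1)).foldl pvMergeStep nums
  a.filter (fun x => x != 0) ++ List.replicate (PySem.List.count a 0) 0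

-- ===== PRECONDITION & SPEC =====
def Spec_applyOperations (nums : List Int) (out : List Int) : Prop := out = applyOperations_alt nums
instance (nums : List Int) (out : List Int) : Decidable (Spec_applyOperations nums out) := by unfold Spec_applyOperations; infer_instance

-- ===== CLAIM (what is proved, stated in full; the proofs are below) =====
def Claim_equal_applyOperations : Prop := ∀ (nums : List Int), Dom_applyOperations nums → Spec_applyOperations nums (applyOperations nums)

-- ===== LEMMAS AND PROOFS =====

-- partially merged array after the first min r (n-1) merge steps (so pvPm n is B's fully merged array)
def pvPm (nums : List Int) (r : Nat) : List Int :=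
  (List.range (min r (nums.length - 1))).foldl pvMergeStep nums

-- A's loop state after r iterations
def pvSt (nums : List Int) (r : Nat) : List Int × Nat :=
  (List.range r).foldl pvStepA (nums, 0)

-- loop invariant: after r iterations A's array is
--   (nonzeros of the merged prefix F) ++ zeros ++ (not-yet-processed suffix D of the partial merge)
def pvInv (nums : List Int) (r : Nat) : Prop :=
  ∃ F D, pvPm nums r = F ++ D ∧ F.length = r ∧
    pvSt nums r = (F.filter (fun x => x != 0) ++
                   (List.replicate (r - (F.filter (fun x => x != 0)).length) 0 ++ D),
                   (F.filter (fun x => x != 0)).length) ∧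
    (F.filter (fun x => x != 0)).length ≤ r

lemma pv_getD_app (P X : List Int) (i : Nat) : (P ++ X).getD (P.length + i) 0 = X.getD i 0 := by
  simp [List.getD, List.getElem?_append_right]

lemma pv_set_app (P X : List Int) (i : Nat) (v : Int) :
    (P ++ X).set (P.length + i) v = P ++ X.set i v := by
  rw [List.set_append_right _ _ (by omega)]
  simp

lemma pvMergeStep_len (a : List Int) (i : Nat) : (pvMergeStep a i).length = a.length := by
  unfold pvMergeStep; split <;> simp

lemma pv_foldl_merge_len (L : List Nat) (a : List Int) :
    (L.foldl pvMergeStep a).length = a.length := by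
  induction L generalizing a with
  | nil => rfl
  | cons i L ih => simp [List.foldl, ih, pvMergeStep_len]

lemma pvPm_len (nums : List Int) (r : Nat) : (pvPm nums r).length = nums.length := by
  unfold pvPm; exact pv_foldl_merge_len _ _

lemma pvPm_succ (nums : List Int) (r : Nat) (h : r + 1 < nums.length) :
    pvPm nums (r+1) = pvMergeStep (pvPm nums r) r := by
  unfold pvPm
  have h1 : min (r+1) (nums.length - 1) = r + 1 := by omega
  have h2 : min r (nums.length - 1) = r := by omega
  rw [h1, h2, List.range_succ, List.foldl_append]
  simp

lemma pvPm_last (nums : List Int) (r : Nat) (h2 : ¬ (r + 1 < nums.length)) :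
    pvPm nums (r+1) = pvPm nums r := by
  have h : min (r+1) (nums.length - 1) = min r (nums.length - 1) := by omega
  rw [pvPm, pvPm, h]

lemma pvSt_succ (nums : List Int) (r : Nat) :
    pvSt nums (r+1) = pvStepA (pvSt nums r) r := by
  unfold pvSt; rw [List.range_succ, List.foldl_append]; simp

-- merging at the junction of a decomposed array
lemma pv_merge_sets (P : List Int) (d : Int) (X : List Int) (v : Int) :
    (P ++ d :: X).set P.length v = P ++ v :: X := by
  have := pv_set_app P (d :: X) 0 v
  simpa using this

lemma pv_merge_sets1 (P : List Int) (d e : Int) (X : List Int) (v : Int) :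
    (P ++ d :: e :: X).set (P.length + 1) v = P ++ d :: v :: X := by
  have := pv_set_app P (d :: e :: X) 1 v
  simpa using this

lemma pv_getD0 (P : List Int) (d : Int) (X : List Int) :
    (P ++ d :: X).getD P.length 0 = d := by
  have := pv_getD_app P (d :: X) 0
  simpa using this

lemma pv_getD1 (P : List Int) (d e : Int) (X : List Int) :
    (P ++ d :: e :: X).getD (P.length + 1) 0 = e := by
  have := pv_getD_app P (d :: e :: X) 1
  simpa using this

lemma pv_mergeStep_at (F : List Int) (d e : Int) (T : List Int) :
    pvMergeStep (F ++ d :: e :: T) F.length =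
      if d = e then F ++ (d*2) :: 0 :: T else F ++ d :: e :: T := by
  unfold pvMergeStep
  rw [pv_getD0, pv_getD1]
  by_cases hde : d = e
  · rw [if_pos hde, if_pos hde, pv_merge_sets, pv_merge_sets1]
  · rw [if_neg hde, if_neg hde]

-- the compaction half of A's step, on the decomposed state
lemma pv_compact (C D1 : List Int) (k : Nat) (v : Int) :
    (if (C ++ (List.replicate k 0 ++ v :: D1)).getD (C.length + k) 0 ≠ 0 then
       ((if C.length ≠ C.length + k
          then ((C ++ (List.replicate k 0 ++ v :: D1)).set C.length
                  ((C ++ (List.replicate k 0 ++ v :: D1)).getD (C.length + k) 0)).set (C.length + k) 0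
          else (C ++ (List.replicate k 0 ++ v :: D1)).set C.length
                  ((C ++ (List.replicate k 0 ++ v :: D1)).getD (C.length + k) 0)),
        C.length + 1)
     else (C ++ (List.replicate k 0 ++ v :: D1), C.length))
    = if v = 0 then (C ++ (List.replicate (k+1) 0 ++ D1), C.length)
      else ((C ++ [v]) ++ (List.replicate k 0 ++ D1), C.length + 1) := by
  have hget : (C ++ (List.replicate k 0 ++ v :: D1)).getD (C.length + k) 0 = v := by
    have h := pv_getD_app (C ++ List.replicate k 0) (v :: D1) 0
    simpa [Nat.add_assoc] using h
  rw [hget]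
  by_cases hv : v = 0
  · rw [if_neg (by simpa using hv), if_pos hv]
    subst hv
    congr 1
    simp [List.replicate_succ' (n := k)]
  · rw [if_pos hv, if_neg hv]
    cases k with
    | zero =>
      rw [if_neg (by omega)]
      have h0 : (C ++ (List.replicate 0 0 ++ v :: D1)).set C.length v = C ++ (v :: D1) := by
        simpa using pv_merge_sets C v D1 v
      rw [h0]
      simp
    | succ k' =>
      rw [if_pos (by omega)]
      have h1 : (C ++ (List.replicate (k'+1) 0 ++ v :: D1)).set C.length v
              = C ++ v :: (List.replicate k' 0 ++ v :: D1) := by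
        have := pv_merge_sets C 0 (List.replicate k' 0 ++ v :: D1) v
        simpa [List.replicate_succ] using this
      rw [h1]
      have h2 : (C ++ v :: (List.replicate k' 0 ++ v :: D1)).set (C.length + (k'+1)) 0
              = C ++ v :: (List.replicate k' 0 ++ 0 :: D1) := by
        have := pv_set_app (C ++ v :: List.replicate k' 0) (v :: D1) 0 0
        simp only [List.length_append, List.length_cons, List.length_replicate] at this
        have e1 : C.length + (k' + 1) = C.length + (1 + k') + 0 := by omega
        rw [e1]
        simpa [List.append_assoc, Nat.add_comm] using this
      rw [h2]
      congr 1
      simp [List.replicate_succ' (n := k'), List.append_assoc]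

lemma pvInv_zero (nums : List Int) : pvInv nums 0 := by
  refine ⟨[], nums, ?_, rfl, ?_, by simp⟩
  · simp [pvPm]
  · simp [pvSt]

lemma pv_len_split (l : List Int) :
    l.length = (l.filter (fun x => x != 0)).length + (l.filter (fun x => x == 0)).length := by
  induction l with
  | nil => simp
  | cons x t ih => by_cases h : x = 0 <;> simp [h] <;> omega

lemma pvInv_step (nums : List Int) (r : Nat) (hr : r < nums.length) (h : pvInv nums r) :
    pvInv nums (r+1) := by
  classical
  obtain ⟨F, D, hPm, hF, hSt, hle⟩ := h
  have hlenPm : (pvPm nums r).length = nums.length := pvPm_len nums r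
  have hD : D.length = nums.length - r := by
    rw [hPm] at hlenPm; simp at hlenPm; omega
  cases D with
  | nil => exfalso; simp at hD; omega
  | cons d D' =>
  set C := F.filter (fun x => x != 0) with hC
  set l := C.length with hl
  set k := r - l with hk
  have hkr : C.length + k = r := by omega
  have hSt' : pvSt nums r = (C ++ (List.replicate k 0 ++ d :: D'), l) := by
    rw [hSt]
  have hstep : pvSt nums (r+1) = pvStepA (C ++ (List.replicate k 0 ++ d :: D'), l) r := by
    rw [pvSt_succ, hSt']
  have hlenA : (C ++ (List.replicate k 0 ++ d :: D')).length = nums.length := by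
    simp; simp at hD; omega
  by_cases hlast : r + 1 < nums.length
  · -- D' is nonempty
    cases D' with
    | nil => exfalso; simp at hD; omega
    | cons e T =>
    have hguard : r < (C ++ (List.replicate k 0 ++ d :: e :: T)).length - 1 := by
      rw [hlenA]; omega
    have hget_r : (C ++ (List.replicate k 0 ++ d :: e :: T)).getD r 0 = d := by
      rw [← hkr]
      have := pv_getD0 (C ++ List.replicate k 0) d (e :: T)
      simpa [List.append_assoc] using this
    have hget_r1 : (C ++ (List.replicate k 0 ++ d :: e :: T)).getD (r+1) 0 = e := by
      rw [← hkr]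
      have := pv_getD1 (C ++ List.replicate k 0) d e T
      simpa [List.append_assoc] using this
    have hsets : ((C ++ (List.replicate k 0 ++ d :: e :: T)).set r (d * 2)).set (r+1) 0
               = C ++ (List.replicate k 0 ++ (d*2) :: 0 :: T) := by
      rw [← hkr]
      have h1 := pv_merge_sets (C ++ List.replicate k 0) d (e :: T) (d*2)
      have h2 := pv_merge_sets1 (C ++ List.replicate k 0) (d*2) e T 0
      simp only [List.append_assoc, List.length_append, List.length_replicate] at h1 h2
      rw [h1, h2]
    have hPm1 : pvPm nums (r+1) =
        if d = e then (F ++ [d*2]) ++ (0 :: T) else (F ++ [d]) ++ (e :: T) := by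
      rw [pvPm_succ nums r hlast, hPm, ← hF, pv_mergeStep_at]
      by_cases hde : d = e <;> simp [hde]
    by_cases hde : d = e
    · -- merged: v = d*2, D1 = 0 :: T
      refine ⟨F ++ [d*2], 0 :: T, by rw [hPm1, if_pos hde], by simp [hF], ?_, ?_⟩
      · rw [hstep]
        simp only [pvStepA]
        have hcond : r < (C ++ (List.replicate k 0 ++ d :: e :: T)).length - 1 ∧
            (C ++ (List.replicate k 0 ++ d :: e :: T)).getD r 0 =
            (C ++ (List.replicate k 0 ++ d :: e :: T)).getD (r+1) 0 :=
          ⟨hguard, by rw [hget_r, hget_r1]; exact hde⟩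
        rw [if_pos hcond, hget_r, hsets, ← hkr, hl, pv_compact C (0 :: T) k (d*2)]
        by_cases hv : d*2 = 0
        · rw [if_pos hv]
          have hfil : (F ++ [d*2]).filter (fun x => x != 0) = C := by
            simp [hC, List.filter_append, hv]
          rw [hfil]
          have harith : C.length + k + 1 - C.length = k + 1 := by omega
          rw [harith]
        · rw [if_neg hv]
          have hfil : (F ++ [d*2]).filter (fun x => x != 0) = C ++ [d*2] := by
            simp [hC, List.filter_append, hv]
          rw [hfil]
          have h1 : (C ++ [d*2]).length = C.length + 1 := by simp
          rw [h1]
          have harith : C.length + k + 1 - (C.length + 1) = k := by omega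
          rw [harith]
      · by_cases hv : d*2 = 0 <;> simp [List.filter_append, hv, ← hC] <;> omega
    · -- not merged: v = d, D1 = e :: T
      refine ⟨F ++ [d], e :: T, by rw [hPm1, if_neg hde], by simp [hF], ?_, ?_⟩
      · rw [hstep]
        simp only [pvStepA]
        have hncond : ¬(r < (C ++ (List.replicate k 0 ++ d :: e :: T)).length - 1 ∧
            (C ++ (List.replicate k 0 ++ d :: e :: T)).getD r 0 =
            (C ++ (List.replicate k 0 ++ d :: e :: T)).getD (r+1) 0) := by
          rw [hget_r, hget_r1]; exact fun hh => hde hh.2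
        rw [if_neg hncond, ← hkr, hl, pv_compact C (e :: T) k d]
        by_cases hv : d = 0
        · rw [if_pos hv]
          have hfil : (F ++ [d]).filter (fun x => x != 0) = C := by
            simp [hC, List.filter_append, hv]
          rw [hfil]
          have harith : C.length + k + 1 - C.length = k + 1 := by omega
          rw [harith]
        · rw [if_neg hv]
          have hfil : (F ++ [d]).filter (fun x => x != 0) = C ++ [d] := by
            simp [hC, List.filter_append, hv]
          rw [hfil]
          have h1 : (C ++ [d]).length = C.length + 1 := by simp
          rw [h1]
          have harith : C.length + k + 1 - (C.length + 1) = k := by omega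
          rw [harith]
      · by_cases hv : d = 0 <;> simp [List.filter_append, hv, ← hC] <;> omega
  · -- last step: r + 1 = nums.length, D' = []
    have hD'nil : D' = [] := by
      cases D' with
      | nil => rfl
      | cons x xs => exfalso; simp at hD; omega
    subst hD'nil
    have hPm1 : pvPm nums (r+1) = (F ++ [d]) ++ [] := by
      rw [pvPm_last nums r hlast, hPm]; simp
    refine ⟨F ++ [d], [], hPm1, by simp [hF], ?_, ?_⟩
    · rw [hstep]
      simp only [pvStepA]
      have hncond : ¬(r < (C ++ (List.replicate k 0 ++ d :: [])).length - 1 ∧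
          (C ++ (List.replicate k 0 ++ d :: [])).getD r 0 =
          (C ++ (List.replicate k 0 ++ d :: [])).getD (r+1) 0) := by
        rw [hlenA]
        rintro ⟨h1, -⟩
        omega
      rw [if_neg hncond, ← hkr, hl, pv_compact C [] k d]
      by_cases hv : d = 0
      · rw [if_pos hv]
        have hfil : (F ++ [d]).filter (fun x => x != 0) = C := by
          simp [hC, List.filter_append, hv]
        rw [hfil]
        have harith : C.length + k + 1 - C.length = k + 1 := by omega
        rw [harith]
      · rw [if_neg hv]
        have hfil : (F ++ [d]).filter (fun x => x != 0) = C ++ [d] := by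
          simp [hC, List.filter_append, hv]
        rw [hfil]
        have h1 : (C ++ [d]).length = C.length + 1 := by simp
        rw [h1]
        have harith : C.length + k + 1 - (C.length + 1) = k := by omega
        rw [harith]
    · by_cases hv : d = 0 <;> simp [List.filter_append, hv, ← hC] <;> omega

lemma pvInv_all (nums : List Int) (r : Nat) (h : r ≤ nums.length) : pvInv nums r := by
  induction r with
  | zero => exact pvInv_zero nums
  | succ r ih => exact pvInv_step nums r (by omega) (ih (by omega))

lemma pv_count_filter (F : List Int) :
    PySem.List.count F 0 = F.length - (F.filter (fun x => x != 0)).length := by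
  have h1 : PySem.List.count F 0 = (F.filter (fun x => x == 0)).length := by
    simp [PySem.List.count, List.count_eq_countP, List.countP_eq_length_filter]
  have h2 := pv_len_split F
  omega

-- ===== VERDICT (by name: the statement is the Claim_ definition above) =====
theorem applyOperations_spec : Claim_equal_applyOperations := by
  intro nums _
  unfold Spec_applyOperations
  obtain ⟨F, D, hPm, hF, hSt, hle⟩ := pvInv_all nums nums.length (le_refl _)
  have hlenPm : (pvPm nums nums.length).length = nums.length := pvPm_len nums nums.length
  have hDnil : D = [] := by
    rw [hPm] at hlenPm
    simp at hlenPm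
    have : D.length = 0 := by omega
    exact List.eq_nil_of_length_eq_zero this
  subst hDnil
  have hM : (List.range (nums.length - 1)).foldl pvMergeStep nums = F := by
    have : pvPm nums nums.length = F := by simpa using hPm
    rw [← this]
    unfold pvPm
    have hmin : min nums.length (nums.length - 1) = nums.length - 1 := by omega
    rw [hmin]
  show ((List.range nums.length).foldl pvStepA (nums, 0)).1 = applyOperations_alt nums
  have hA : ((List.range nums.length).foldl pvStepA (nums, 0)).1
      = F.filter (fun x => x != 0) ++
        (List.replicate (nums.length - (F.filter (fun x => x != 0)).length) 0 ++ []) := by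
    have : pvSt nums nums.length = _ := hSt
    unfold pvSt at this
    rw [this]
  rw [hA]
  unfold applyOperations_alt
  simp only [hM]
  rw [pv_count_filter F, hF]
  simp
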